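-- pv_equiv track=rewrite | github.com/chiloutus/WebDev | commentsapp-C4/commentsapp.py | isInSource
-- ===== SOURCE A (Python) =====
-- def hasTooManyLetters(word,source,i):
--     return source.count(i) < word.count(i)
--
-- def isInSource(word,source):
--     count = len(word)
--     for i in word:
--         if i in source:
--             if not hasTooManyLetters(word,source,i):
--                 count -= 1
--     if(count == 0):
--         return True
--     else:
--         return False
-- ===== SOURCE B (Python) =====
-- def isInSource(word, source):
--     sc = {}
--     for ch in source:
--         sc[ch] = sc.get(ch, 0) + 1
--     wc = {}
--     for ch in word:
--         wc[ch] = wc.get(ch, 0) + 1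
--     return all(sc.get(ch, 0) >= n for ch, n in wc.items())
-- ===== Notes on version B (the rewrite author's own statement) =====
-- stated objective: faster
-- what changed: Replaces A's per-character rescans (word.count and source.count inside the loop over word) with two frequency dictionaries built in one pass each, followed by a single comparison over the word's distinct characters.
import Mathlib
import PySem

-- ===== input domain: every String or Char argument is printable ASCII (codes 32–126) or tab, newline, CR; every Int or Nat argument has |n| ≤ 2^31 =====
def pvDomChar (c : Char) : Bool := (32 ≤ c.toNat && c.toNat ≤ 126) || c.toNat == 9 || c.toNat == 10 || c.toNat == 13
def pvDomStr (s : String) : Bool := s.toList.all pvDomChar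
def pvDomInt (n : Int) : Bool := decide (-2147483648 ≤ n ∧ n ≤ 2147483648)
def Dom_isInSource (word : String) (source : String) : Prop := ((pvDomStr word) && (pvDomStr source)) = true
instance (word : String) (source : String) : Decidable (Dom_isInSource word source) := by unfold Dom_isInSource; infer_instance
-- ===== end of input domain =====

-- B replaces A's per-character rescans with two frequency dictionaries built once; measurably faster (O(n+m) vs O(n*(n+m))).

-- ===== PORT A =====
-- hasTooManyLetters(word, source, i): source.count(i) < word.count(i)
def pvHasTooManyLetters (word : List Char) (source : List Char) (i : Char) : Bool :=
  decide (PySem.Chars.count source [i] < PySem.Chars.count word [i])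

def isInSource (word : String) (source : String) : Bool :=
  let w := word.toList
  let s := source.toList
  let count : Int :=
    w.foldl (fun count i =>
      if PySem.Chars.isIn [i] s then
        if !pvHasTooManyLetters w s i then count - 1 else count
      else count) (w.length : Int)
  if count == 0 then true else false

-- ===== PORT B =====
-- Source B's counting loop: d[ch] = d.get(ch, 0) + 1
def pvCounter (l : List Char) : PySem.Dict Char Int :=
  l.foldl (fun d c => d.insert c (d.getD c 0 + 1)) PySem.Dict.empty

def isInSource_alt (word : String) (source : String) : Bool :=
  let sc := pvCounter source.toList
  let wc := pvCounter word.toList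
  wc.items.all (fun p => decide (sc.getD p.1 0 ≥ p.2))

-- ===== PRECONDITION & SPEC =====
def Spec_isInSource (word : String) (source : String) (out : Bool) : Prop := out = isInSource_alt word source
instance (word : String) (source : String) (out : Bool) : Decidable (Spec_isInSource word source out) := by unfold Spec_isInSource; infer_instance

-- ===== CLAIM (what is proved, stated in full; the proofs are below) =====
def Claim_equal_isInSource : Prop := ∀ (word : String) (source : String), Dom_isInSource word source → Spec_isInSource word source (isInSource word source)

-- ===== LEMMAS AND PROOFS =====

-- 'i in source' for a single character is membership
lemma pv_isIn_singleton (c : Char) (s : List Char) :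
    PySem.Chars.isIn [c] s = true ↔ c ∈ s := by
  rw [PySem.Chars.isIn_iff_infix]
  constructor
  · rintro ⟨p, q, h⟩
    subst h; simp
  · intro h
    obtain ⟨p, q, h⟩ := List.append_of_mem h
    exact ⟨p, q, by simp [h]⟩

-- str.count of a single character is list count
lemma pv_go_step (c h : Char) (t : List Char) (f acc : Nat) :
    PySem.Chars.count.go [c] (f + 1) (h :: t) acc =
      if h = c then PySem.Chars.count.go [c] f t (acc + 1)
      else PySem.Chars.count.go [c] f t acc := by
  by_cases hc : h = c
  · have hpre : List.isPrefixOf [c] (h :: t) = true := by simp [hc]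
    simp [PySem.Chars.count.go, hc]
  · have hpre : List.isPrefixOf [c] (h :: t) = false := by
      simp [List.isPrefixOf]; exact fun h' => hc h'.symm
    simp [PySem.Chars.count.go, hpre, hc]

lemma pv_count_go_singleton (c : Char) :
    ∀ (s : List Char) (fuel acc : Nat), s.length ≤ fuel →
      PySem.Chars.count.go [c] fuel s acc = acc + s.count c := by
  intro s
  induction s with
  | nil =>
      intro fuel acc _
      cases fuel <;> simp [PySem.Chars.count.go]
  | cons h t ih =>
      intro fuel acc hle
      cases fuel with
      | zero => simp at hle
      | succ f =>
          simp only [List.length_cons, Nat.succ_le_succ_iff] at hle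
          rw [pv_go_step]
          by_cases hc : h = c
          · rw [if_pos hc, ih f (acc + 1) hle, List.count_cons]
            simp [hc]
            omega
          · rw [if_neg hc, ih f acc hle, List.count_cons]
            simp [hc]

lemma pv_count_singleton (s : List Char) (c : Char) :
    PySem.Chars.count s [c] = s.count c := by
  simp [PySem.Chars.count]
  simpa using pv_count_go_singleton c s s.length 0 le_rfl

-- A's loop: a pure conditional decrement over the list
lemma pv_foldl_dec (P : Char → Bool) :
    ∀ (w : List Char) (n : Int),
      w.foldl (fun c i => if P i then c - 1 else c) n = n - (w.countP P : Int) := by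
  intro w
  induction w with
  | nil => intro n; simp
  | cons h t ih =>
      intro n
      by_cases hp : P h
      · simp [List.foldl_cons, hp, ih]
        ring
      · simp [List.foldl_cons, hp, ih]

-- A's result characterised
lemma pv_A_iff (word source : String) :
    isInSource word source = true ↔
      ∀ c ∈ word.toList, (word.toList.count c : Int) ≤ source.toList.count c := by
  unfold isInSource
  simp only []
  set w := word.toList
  set s := source.toList
  set P : Char → Bool := fun i =>
    if PySem.Chars.isIn [i] s then (if !pvHasTooManyLetters w s i then true else false) else false
    with hP
  have hfold : ∀ n : Int,
      w.foldl (fun c i =>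
        if PySem.Chars.isIn [i] s then
          if !pvHasTooManyLetters w s i then c - 1 else c
        else c) n = n - (w.countP P : Int) := by
    intro n
    rw [← pv_foldl_dec P w n]
    apply PySem.List.foldl_congr_mem
    intro c i _
    by_cases h1 : PySem.Chars.isIn [i] s <;> by_cases h2 : pvHasTooManyLetters w s i <;>
      simp [hP, h1, h2]
  rw [hfold]
  have hcount : w.countP P ≤ w.length := List.countP_le_length
  constructor
  · intro h c hc
    have hlen : w.countP P = w.length := by
      simp only [beq_iff_eq] at h
      split at h
      · omega
      · exact absurd h (by simp)
    have := (List.countP_eq_length).mp hlen c hc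
    simp only [hP] at this
    split at this
    · rename_i hin
      split at this
      · rename_i hm
        simp [pvHasTooManyLetters, pv_count_singleton] at hm
        exact_mod_cast hm
      · exact absurd this (by simp)
    · exact absurd this (by simp)
  · intro h
    have hlen : w.countP P = w.length := by
      apply List.countP_eq_length.mpr
      intro c hc
      have hle : (w.count c : Int) ≤ s.count c := h c hc
      have hpos : 0 < w.count c := List.count_pos_iff.mpr hc
      have hmem : c ∈ s := by
        apply List.count_pos_iff.mp
        omega
      simp [hP, (pv_isIn_singleton c s).mpr hmem, pvHasTooManyLetters,
        pv_count_singleton]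
      omega
    rw [hlen]
    simp

-- B's result characterised
lemma pv_B_iff (word source : String) :
    isInSource_alt word source = true ↔
      ∀ c ∈ word.toList, (word.toList.count c : Int) ≤ source.toList.count c := by
  unfold isInSource_alt
  have hc : ∀ l : List Char, pvCounter l = PySem.Dict.counter l := fun _ => rfl
  simp only [hc, PySem.Dict.items_counter, PySem.Dict.getD_counter, List.all_map,
    List.all_eq_true]
  constructor
  · intro h c hcmem
    have := h c ((PySem.Set.mem_ofList _ _).mpr hcmem)
    simpa using this
  · intro h c hcmem
    have := h c ((PySem.Set.mem_ofList _ _).mp hcmem)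
    simpa using this

-- ===== VERDICT (by name: the statement is the Claim_ definition above) =====
theorem isInSource_spec : Claim_equal_isInSource := by
  intro word source _
  unfold Spec_isInSource
  rw [Bool.eq_iff_iff, pv_A_iff, pv_B_iff]
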